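-- pv_equiv track=rewrite | github.com/RafaelJGoulart/Dados-de-RPG | gerador_de_dados.py | nome_combinacao
-- ===== SOURCE A (Python) =====
-- def nome_combinacao(lista_dados, quantidades=None):
--     """
--     Gera um nome para a combinação.
--     Se quantidades for None, assume 1 de cada.
--
--     Exemplos:
--     [4, 6] → "1d4+1d6"
--     [4, 4, 4] → "3d4"
--     """
--     if quantidades is None:
--         # Modo antigo: 1 de cada tipo diferente
--         return "+".join([f"1d{faces}" for faces in lista_dados])
--     else:
--         # Modo novo: agrupa por tipo
--         from collections import Counter
--         contagem = Counter(lista_dados)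
--         partes = []
--         for faces in sorted(contagem.keys()):
--             partes.append(f"{contagem[faces]}d{faces}")
--         return "+".join(partes)
-- ===== SOURCE B (Python) =====
-- def nome_combinacao(lista_dados, quantidades=None):
--     """
--     Gera um nome para a combinação.
--     Se quantidades for None, assume 1 de cada.
--     """
--     if quantidades is None:
--         # Modo antigo: 1 de cada tipo diferente
--         return "+".join([f"1d{faces}" for faces in lista_dados])
--     else:
--         # Modo novo: selecao por minimo — sem ordenar e sem tabela de contagem:
--         # a cada passo extrai o menor valor restante, conta-o e remove todas as copias
--         restantes = list(lista_dados)
--         partes = []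
--         while restantes:
--             m = min(restantes)
--             partes.append(f"{restantes.count(m)}d{m}")
--             restantes = [x for x in restantes if x != m]
--         return "+".join(partes)
-- ===== Notes on version B (the rewrite author's own statement) =====
-- stated objective: alternative
-- what changed: The else branch no longer builds a Counter and sorts its keys: B runs a selection loop with no sorting and no counting table, repeatedly taking the minimum of the remaining values, emitting count-of-min d min, and filtering out all its copies.
import Mathlib
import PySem

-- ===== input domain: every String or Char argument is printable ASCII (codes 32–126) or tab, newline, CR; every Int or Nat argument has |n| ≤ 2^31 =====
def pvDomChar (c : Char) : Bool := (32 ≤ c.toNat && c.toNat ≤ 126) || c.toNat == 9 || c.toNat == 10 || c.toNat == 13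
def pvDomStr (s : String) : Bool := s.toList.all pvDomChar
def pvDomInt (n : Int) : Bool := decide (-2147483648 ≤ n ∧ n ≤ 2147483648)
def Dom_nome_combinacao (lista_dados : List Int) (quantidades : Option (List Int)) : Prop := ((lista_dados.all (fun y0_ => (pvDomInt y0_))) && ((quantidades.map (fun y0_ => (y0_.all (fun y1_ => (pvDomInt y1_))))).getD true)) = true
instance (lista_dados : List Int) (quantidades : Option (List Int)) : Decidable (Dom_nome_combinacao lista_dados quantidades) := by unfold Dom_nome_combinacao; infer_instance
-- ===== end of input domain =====

-- B replaces A's Counter-then-sorted-keys grouping by a selection loop with no sorting and no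
-- counting table: repeatedly take the minimum remaining value, emit its count, filter out its copies.

-- ===== PORT A =====
def nome_combinacao (lista_dados : List Int) (quantidades : Option (List Int)) : String :=
  match quantidades with
  | none =>
      PySem.Str.join "+" (lista_dados.map (fun faces => "1d" ++ PySem.Int.toStr faces))
  | some _ =>
      let contagem := PySem.Dict.counter lista_dados
      let partes := (PySem.List.sorted contagem.keys (fun x => x) false).foldl
        (fun acc faces => acc ++ [PySem.Int.toStr (contagem.getD faces 0) ++ "d" ++ PySem.Int.toStr faces]) []
      PySem.Str.join "+" partes

-- ===== PORT B =====
-- the 'while restantes:' selection loop: min of the remainder, count it, drop all its copies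
def pvMinParts (l : List Int) : List String :=
  match hm : PySem.List.min? l (fun a => a) with
  | none => []
  | some m =>
      (PySem.Int.toStr (l.count m : Int) ++ "d" ++ PySem.Int.toStr m)
        :: pvMinParts (l.filter (fun x => x != m))
  termination_by l.length
  decreasing_by
    have hmem : m ∈ l := PySem.List.min?_mem hm
    simp only [List.length_unattach]
    refine lt_of_lt_of_eq
      (List.length_filter_lt_length_iff_exists.mpr ⟨⟨m, hmem⟩, List.mem_attach _ _, ?_⟩)
      List.length_attach
    simp

def nome_combinacao_alt (lista_dados : List Int) (quantidades : Option (List Int)) : String :=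
  match quantidades with
  | none =>
      PySem.Str.join "+" (lista_dados.map (fun faces => "1d" ++ PySem.Int.toStr faces))
  | some _ =>
      PySem.Str.join "+" (pvMinParts lista_dados)

-- ===== PRECONDITION & SPEC =====
def Spec_nome_combinacao (lista_dados : List Int) (quantidades : Option (List Int)) (out : String) : Prop := out = nome_combinacao_alt lista_dados quantidades
instance (lista_dados : List Int) (quantidades : Option (List Int)) (out : String) : Decidable (Spec_nome_combinacao lista_dados quantidades out) := by unfold Spec_nome_combinacao; infer_instance

-- ===== CLAIM (what is proved, stated in full; the proofs are below) =====
def Claim_equal_nome_combinacao : Prop := ∀ (lista_dados : List Int) (quantidades : Option (List Int)), Dom_nome_combinacao lista_dados quantidades → Spec_nome_combinacao lista_dados quantidades (nome_combinacao lista_dados quantidades)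

-- ===== LEMMAS AND PROOFS =====

-- the selection loop emits exactly the sorted distinct values with their counts
lemma pv_minParts_eq (l : List Int) :
    pvMinParts l = (PySem.List.sorted (PySem.Set.ofList l) (fun x => x) false).map
      (fun k => PySem.Int.toStr (l.count k : Int) ++ "d" ++ PySem.Int.toStr k) := by
  induction hn : l.length using Nat.strong_induction_on generalizing l with
  | _ n IH =>
    rw [pvMinParts.eq_def]
    split
    next hm =>
        have : l = [] := by rwa [PySem.List.min?_eq_none_iff] at hm
        subst this
        simp [PySem.Set.ofList, PySem.List.sorted]
    next m hm =>
        have hmem : m ∈ l := PySem.List.min?_mem hm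
        have hmin : ∀ y ∈ l, m ≤ y := PySem.List.min?_isMin hm
        set t := l.filter (fun x => x != m) with ht
        have hmt : m ∉ t := by simp [ht]
        have hmemt : ∀ z, z ∈ t ↔ z ∈ l ∧ z ≠ m := by
          intro z; simp [ht]
        have hlen : t.length < n := by
          have h1 : t.length < l.length := by
            apply List.length_filter_lt_length_iff_exists.mpr
            exact ⟨m, hmem, by simp⟩
          omega
        have ih := IH t.length hlen t rfl
        have hkeys : PySem.List.sorted (PySem.Set.ofList l) (fun x => x) false
            = m :: PySem.List.sorted (PySem.Set.ofList t) (fun x => x) false := by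
          apply PySem.List.sorted_eq_of_perm_of_pairwise_lt
          · apply (List.perm_ext_iff_of_nodup ?_ (PySem.Set.nodup_ofList _)).mpr
            · intro z
              simp only [List.mem_cons, PySem.List.mem_sorted, PySem.Set.mem_ofList, hmemt]
              constructor
              · rintro (rfl | ⟨hz, _⟩)
                · exact hmem
                · exact hz
              · intro hz
                by_cases hzm : z = m
                · exact Or.inl hzm
                · exact Or.inr ⟨hz, hzm⟩
            · refine List.nodup_cons.mpr ⟨?_, ?_⟩
              · intro hx
                exact hmt (by simpa [PySem.List.mem_sorted, PySem.Set.mem_ofList] using hx)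
              · exact (PySem.List.sorted_perm ..).nodup_iff.mpr (PySem.Set.nodup_ofList _)
          · refine List.pairwise_cons.mpr ⟨?_, PySem.List.sorted_ofList_pairwise_lt ..⟩
            intro z hz
            have hzt : z ∈ t := by simpa [PySem.List.mem_sorted, PySem.Set.mem_ofList] using hz
            rcases (hmemt z).mp hzt with ⟨hzl, hzm⟩
            exact lt_of_le_of_ne (hmin z hzl) (fun h => hzm h.symm)
        rw [hkeys, List.map_cons, ih]
        congr 1
        apply List.map_congr_left
        intro k hk
        have hkt : k ∈ t := by simpa [PySem.List.mem_sorted, PySem.Set.mem_ofList] using hk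
        rcases (hmemt k).mp hkt with ⟨_, hkm⟩
        have hc : t.count k = l.count k := by
          rw [ht, List.count_filter (by simp [hkm])]
        rw [hc]

-- ===== VERDICT (by name: the statement is the Claim_ definition above) =====
theorem nome_combinacao_spec : Claim_equal_nome_combinacao := by
  intro lista_dados quantidades _
  unfold Spec_nome_combinacao nome_combinacao nome_combinacao_alt
  cases quantidades with
  | none => rfl
  | some q =>
      simp only
      congr 1
      rw [PySem.List.foldl_append_singleton_eq_map, PySem.Dict.keys_counter, pv_minParts_eq]
      simp only [List.nil_append]
      apply List.map_congr_left
      intro k _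
      rw [PySem.Dict.getD_counter]
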